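-- pv_equiv track=rewrite | github.com/harini422/python-programs | canada no.py | non_trival_divisiors
-- ===== SOURCE A (Python) =====
-- from math import sqrt
--
-- def non_trival_divisiors(n):
--     result=0
--     for i in range(1,int(sqrt(n))+1):
--       if n%i==0:
--         if i==n//i:
--            result+=i
--         else:
--             result+=i+n//i
--
--     return result-1-n
-- ===== SOURCE B (Python) =====
-- def non_trival_divisiors(n):
--     # sum of divisors via prime factorization (multiplicative sigma), minus the trivial divisors 1 and n
--     sigma = 1
--     m = n
--     p = 2
--     while p * p <= m:
--         if m % p == 0:
--             term = 1
--             while m % p == 0: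
--                 m //= p
--                 term = term * p + 1
--             sigma *= term
--         p += 1
--     if m > 1:
--         sigma *= m + 1
--     return sigma - 1 - n
-- ===== Notes on version B (the rewrite author's own statement) =====
-- stated objective: faster
-- what changed: Replaced the divisor-pair scan over all i up to sqrt(n) with trial-division prime factorization, computing sigma(n) as the product of geometric-series factors per prime power and subtracting 1+n.
-- outside the precondition, e.g. on non_trival_divisiors(-5): A raises ValueError, B returns 5; on non_trival_divisiors(0): A returns -1, B returns 0
import Mathlib
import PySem

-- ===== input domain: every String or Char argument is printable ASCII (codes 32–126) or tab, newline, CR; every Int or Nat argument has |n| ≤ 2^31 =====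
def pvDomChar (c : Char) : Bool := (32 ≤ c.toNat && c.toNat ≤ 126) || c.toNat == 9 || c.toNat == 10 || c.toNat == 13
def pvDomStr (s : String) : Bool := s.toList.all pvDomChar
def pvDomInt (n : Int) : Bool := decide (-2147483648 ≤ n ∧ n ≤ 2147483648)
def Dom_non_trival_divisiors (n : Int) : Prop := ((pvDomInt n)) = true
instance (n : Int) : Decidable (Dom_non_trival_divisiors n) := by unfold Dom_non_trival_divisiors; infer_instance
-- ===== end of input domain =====

-- B replaces A's divisor-pair scan over all i up to sqrt(n) by trial-division prime
-- factorization, building sigma(n) as a product of geometric-series factors (objective: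
-- alternative algorithm).

-- ===== PORT A =====
-- int(sqrt(n)) equals the integer square root of n for every n in Dom with n ≥ 0
-- (math.sqrt is a correctly rounded double, exact at this magnitude), so it is ported
-- as Nat.sqrt n.toNat.
def non_trival_divisiors (n : Int) : Int :=
  (((PySem.List.pyRange 1 ((Nat.sqrt n.toNat : Int) + 1) 1).foldl
    (fun result i =>
      if PySem.Int.mod n i = 0 then
        if i = PySem.Int.floordiv n i then result + i
        else result + (i + PySem.Int.floordiv n i)
      else result) 0)) - 1 - n

-- ===== PORT B =====
-- inner loop `while m % p == 0: m //= p; term = term * p + 1`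
-- (the 2 ≤ p and 0 < m guards only make the recursion total; they hold at every call site)
theorem pvBInner_dec (p m : Int) (hp : 2 ≤ p) (hm : 0 < m)
    (hmod : PySem.Int.mod m p = 0) : (PySem.Int.floordiv m p).toNat < m.toNat := by
  rw [PySem.Int.floordiv_eq_ediv_of_pos (by omega)]
  have hd : p ∣ m := (PySem.Int.mod_eq_zero_iff_dvd m p).mp hmod
  have hq : m / p * p = m := Int.ediv_mul_cancel hd
  have hq0 : 0 < m / p := by nlinarith
  have hlt : m / p < m := by nlinarith
  omega

def pvBInner (p m term : Int) : Int × Int :=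
  if h : 2 ≤ p ∧ 0 < m ∧ PySem.Int.mod m p = 0 then
    pvBInner p (PySem.Int.floordiv m p) (term * p + 1)
  else (term, m)
termination_by m.toNat
decreasing_by exact pvBInner_dec p m h.1 h.2.1 h.2.2

-- these two lemmas are cited by pvBOuter's termination argument, so they stay with the port
theorem pvBInner_floordiv_le (p m : Int) (hp : 2 ≤ p) (hm : 0 < m) (hd : PySem.Int.mod m p = 0) :
    0 < PySem.Int.floordiv m p ∧ PySem.Int.floordiv m p < m := by
  rw [PySem.Int.floordiv_eq_ediv_of_pos (by omega)]
  have hd : p ∣ m := (PySem.Int.mod_eq_zero_iff_dvd m p).mp hd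
  have hq : m / p * p = m := Int.ediv_mul_cancel hd
  constructor
  · nlinarith
  · nlinarith [Int.ediv_nonneg (le_of_lt hm) (by omega : (0:Int) ≤ p)]

theorem pvBInner_snd_le (p m term : Int) : (pvBInner p m term).2 ≤ m := by
  fun_induction pvBInner p m term with
  | case1 m t h ih =>
    obtain ⟨hp, hm, hmod⟩ := h
    exact le_trans ih (le_of_lt (pvBInner_floordiv_le p m hp hm hmod).2)
  | case2 m t h => simp

-- outer loop `while p * p <= m:` plus the trailing `if m > 1` adjustment
-- (the 2 ≤ p guard only makes the recursion total; p starts at 2 and only grows)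
theorem pvBOuter_dec1 (p m : Int) (hp : 2 ≤ p) (hpm : p * p ≤ m) :
    ((pvBInner p m 1).2 + 2 - (p + 1)).toNat < (m + 2 - p).toNat := by
  have h1 : (pvBInner p m 1).2 ≤ m := pvBInner_snd_le p m 1
  have h2 : p ≤ p * p := le_mul_of_one_le_left (by omega) (by omega)
  omega

theorem pvBOuter_dec2 (p m : Int) (hp : 2 ≤ p) (hpm : p * p ≤ m) :
    (m + 2 - (p + 1)).toNat < (m + 2 - p).toNat := by
  have h2 : p ≤ p * p := le_mul_of_one_le_left (by omega) (by omega)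
  omega

def pvBOuter (p m sigma : Int) : Int :=
  if h : 2 ≤ p ∧ p * p ≤ m then
    if PySem.Int.mod m p = 0 then
      let r := pvBInner p m 1
      pvBOuter (p + 1) r.2 (sigma * r.1)
    else pvBOuter (p + 1) m sigma
  else if 1 < m then sigma * (m + 1) else sigma
termination_by (m + 2 - p).toNat
decreasing_by
  · exact pvBOuter_dec1 p m h.1 h.2
  · exact pvBOuter_dec2 p m h.1 h.2

def non_trival_divisiors_alt (n : Int) : Int :=
  pvBOuter 2 n 1 - 1 - n

-- ===== PRECONDITION & SPEC =====
-- Pre_ excludes n < 0, where A raises ValueError (math.sqrt of a negative number), and the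
-- single corner n = 0, where "sum of non-trivial divisors" is meaningless and A's -1 (an
-- empty loop minus 1 minus 0) and B's 0 (empty product minus 1) are both accidental.
def Pre_non_trival_divisiors (n : Int) : Prop := 1 ≤ n
instance (n : Int) : Decidable (Pre_non_trival_divisiors n) := by
  unfold Pre_non_trival_divisiors; infer_instance
def pvWitness_non_trival_divisiors : Int := 12

def Spec_non_trival_divisiors (n : Int) (out : Int) : Prop := out = non_trival_divisiors_alt n
instance (n : Int) (out : Int) : Decidable (Spec_non_trival_divisiors n out) := by
  unfold Spec_non_trival_divisiors; infer_instance

-- ===== CLAIM (what is proved, stated in full; the proofs are below) =====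
def Claim_equal_non_trival_divisiors : Prop :=
  ∀ (n : Int), Dom_non_trival_divisiors n → Pre_non_trival_divisiors n →
    Spec_non_trival_divisiors n (non_trival_divisiors n)

-- ===== LEMMAS AND PROOFS =====

theorem pvBInner_spec (p m t : Int) (hp : 2 ≤ p) (hm : 0 < m) :
    ∃ k : ℕ, ¬ (p ∣ (pvBInner p m t).2) ∧ m = p ^ k * (pvBInner p m t).2 ∧
      0 < (pvBInner p m t).2 ∧
      (pvBInner p m t).1 = t * p ^ k + ∑ i ∈ Finset.range k, p ^ i := by
  fun_induction pvBInner p m t with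
  | case1 m t h ih =>
    obtain ⟨hp', hm', hmod⟩ := h
    have hfl := pvBInner_floordiv_le p m hp' hm' hmod
    obtain ⟨k, hnd, heq, hpos, hfst⟩ := ih hfl.1
    have hdvd : p ∣ m := (PySem.Int.mod_eq_zero_iff_dvd m p).mp hmod
    have hq : PySem.Int.floordiv m p * p = m := by
      rw [PySem.Int.floordiv_eq_ediv_of_pos (by omega)]
      exact Int.ediv_mul_cancel hdvd
    refine ⟨k + 1, hnd, ?_, hpos, ?_⟩
    · linear_combination (-1 : ℤ) * hq + p * heq
    · rw [hfst, geom_sum_succ']; ring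
  | case2 m t h =>
    refine ⟨0, ?_, by simp, by omega, by simp⟩
    intro hdvd
    have : PySem.Int.mod m p = 0 := (PySem.Int.mod_eq_zero_iff_dvd m p).mpr hdvd
    exact h ⟨hp, hm, this⟩

theorem pvBOuter_spec (p m s : Int) (hp : 2 ≤ p) (hm : 1 ≤ m)
    (hmin : ∀ q : ℕ, q.Prime → (q : Int) ∣ m → p ≤ (q : Int)) :
    pvBOuter p m s = s * ((∑ d ∈ m.toNat.divisors, d : ℕ) : Int) := by
  fun_induction pvBOuter p m s with
  | case1 p m sigma h hmod r ih =>
    obtain ⟨hp2, hpm⟩ := h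
    have hm1 : (1:Int) ≤ m := by nlinarith
    have hdvd : p ∣ m := (PySem.Int.mod_eq_zero_iff_dvd m p).mp hmod
    obtain ⟨k, hnd, heq, hpos, hfst⟩ := pvBInner_spec p m 1 hp2 (by omega)
    have hrdef : r = pvBInner p m 1 := rfl
    rw [hrdef]
    simp only [hrdef] at ih
    -- p is prime
    have hpcast : ((p.toNat : Int)) = p := Int.toNat_of_nonneg (by omega)
    have hqp : (p.toNat.minFac : Int) ∣ p := by
      rw [← hpcast]; exact_mod_cast Nat.minFac_dvd p.toNat
    have hqprime : p.toNat.minFac.Prime := Nat.minFac_prime (by omega)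
    have hple : p ≤ (p.toNat.minFac : Int) := hmin _ hqprime (dvd_trans hqp hdvd)
    have hqle : (p.toNat.minFac : Int) ≤ p := by
      rw [← hpcast]; exact_mod_cast Nat.minFac_le (by omega)
    have hqeq : p.toNat.minFac = p.toNat := by omega
    have hpp : p.toNat.Prime := hqeq ▸ hqprime
    -- Nat-level factorization
    have hr2cast : ((pvBInner p m 1).2.toNat : Int) = (pvBInner p m 1).2 :=
      Int.toNat_of_nonneg (by omega)
    have hmnat : m.toNat = p.toNat ^ k * (pvBInner p m 1).2.toNat := by
      have : ((m.toNat : Int)) = ((p.toNat ^ k * (pvBInner p m 1).2.toNat : ℕ) : Int) := by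
        push_cast
        rw [hpcast, hr2cast, Int.toNat_of_nonneg (by omega : (0:Int) ≤ m)]
        exact heq
      exact_mod_cast this
    have hnddvd : ¬ (p.toNat ∣ (pvBInner p m 1).2.toNat) := by
      intro hc
      have h' : ((p.toNat : Int)) ∣ ((pvBInner p m 1).2.toNat : Int) := Int.natCast_dvd_natCast.mpr hc
      rw [hpcast, hr2cast] at h'
      exact hnd h'
    have hcop : Nat.Coprime (p.toNat ^ k) (pvBInner p m 1).2.toNat :=
      Nat.Coprime.pow_left _ ((Nat.Prime.coprime_iff_not_dvd hpp).mpr hnddvd)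
    have hsum := Nat.Coprime.sum_divisors_mul hcop
    have hppow : ∑ d ∈ (p.toNat ^ k).divisors, d = ∑ i ∈ Finset.range (k+1), p.toNat ^ i :=
      Nat.sum_divisors_prime_pow hpp
    -- the accumulated term is sigma(p^k)
    have hterm : (pvBInner p m 1).1 = ((∑ i ∈ Finset.range (k+1), p.toNat ^ i : ℕ) : Int) := by
      rw [hfst, geom_sum_succ']
      push_cast [hpcast]
      ring
    -- apply the IH
    have hmin' : ∀ q : ℕ, q.Prime → (q : Int) ∣ (pvBInner p m 1).2 → p + 1 ≤ (q : Int) := by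
      intro q hq hdq
      have h1 : (q : Int) ∣ m := hdq.trans (Dvd.intro_left _ heq.symm)
      have h2 : p ≤ (q : Int) := hmin q hq h1
      have h3 : (q : Int) ≠ p := by
        intro hc
        exact hnd (hc ▸ hdq)
      omega
    rw [ih (by omega) (by omega) hmin']
    rw [hterm, hmnat, hsum, hppow]
    push_cast
    ring
  | case2 p m sigma h hmod ih =>
    obtain ⟨hp2, hpm⟩ := h
    have hm1 : (1:Int) ≤ m := by nlinarith
    have hnd : ¬ p ∣ m := fun hc => hmod ((PySem.Int.mod_eq_zero_iff_dvd m p).mpr hc)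
    apply ih (by omega) hm1
    intro q hq hdq
    have h2 : p ≤ (q : Int) := hmin q hq hdq
    have h3 : (q : Int) ≠ p := fun hc => hnd (hc ▸ hdq)
    omega
  | case3 p m sigma h h1 =>
    have hppm : m < p * p := by
      by_contra hc
      exact h ⟨hp, by omega⟩
    -- m is prime: its least prime factor is ≥ p, but a composite m has minFac² ≤ m < p²
    have hmcast : ((m.toNat : Int)) = m := Int.toNat_of_nonneg (by omega)
    have hqprime : m.toNat.minFac.Prime := Nat.minFac_prime (by omega)
    have hqdvd : (m.toNat.minFac : Int) ∣ m := by
      rw [← hmcast]; exact_mod_cast Nat.minFac_dvd m.toNat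
    have hple : p ≤ (m.toNat.minFac : Int) := hmin _ hqprime hqdvd
    have hmp : m.toNat.Prime := by
      by_contra hc
      have hsq := Nat.minFac_sq_le_self (by omega : 0 < m.toNat) hc
      have : ((m.toNat.minFac ^ 2 : ℕ) : Int) ≤ ((m.toNat : ℕ) : Int) := by exact_mod_cast hsq
      push_cast at this
      rw [hmcast] at this
      nlinarith
    have hdiv : m.toNat.divisors = {1, m.toNat} := Nat.Prime.divisors hmp
    have hsum : ∑ d ∈ m.toNat.divisors, d = 1 + m.toNat := by
      rw [hdiv, Finset.sum_insert (by simp; omega), Finset.sum_singleton]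
    rw [hsum]
    push_cast
    rw [hmcast]
    ring
  | case4 p m sigma h h1 =>
    have hm1 : m = 1 := by omega
    subst hm1
    norm_num

theorem pv_core_sqrt_sum (N : ℕ) (hN : 1 ≤ N) :
    ∑ i ∈ Finset.Ico 1 (Nat.sqrt N + 1),
      (if N % i = 0 then (if i = N / i then i else i + N / i) else 0)
      = ∑ d ∈ N.divisors, d := by
  have hr1 : Nat.sqrt N * Nat.sqrt N ≤ N := Nat.sqrt_le N
  have hr2 : N < (Nat.sqrt N + 1) * (Nat.sqrt N + 1) := Nat.lt_succ_sqrt N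
  have hrpos : 0 < Nat.sqrt N := Nat.sqrt_pos.mpr (by omega)
  -- the scan range [1, sqrt N] hits exactly the small divisors
  have hstep1 : ∑ i ∈ Finset.Ico 1 (Nat.sqrt N + 1),
      (if N % i = 0 then (if i = N / i then i else i + N / i) else 0)
      = ∑ i ∈ (Finset.Ico 1 (Nat.sqrt N + 1)).filter (· ∣ N),
          (if i = N / i then i else i + N / i) := by
    rw [Finset.sum_filter]
    apply Finset.sum_congr rfl
    intro i hi
    simp only [← Nat.dvd_iff_mod_eq_zero]
  have hset : (Finset.Ico 1 (Nat.sqrt N + 1)).filter (· ∣ N)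
      = N.divisors.filter (· ≤ Nat.sqrt N) := by
    ext i
    simp only [Finset.mem_filter, Finset.mem_Ico, Nat.mem_divisors]
    constructor
    · rintro ⟨⟨hi1, hi2⟩, hd⟩
      exact ⟨⟨hd, by omega⟩, by omega⟩
    · rintro ⟨⟨hd, _⟩, hle⟩
      exact ⟨⟨Nat.pos_of_dvd_of_pos hd (by omega), by omega⟩, hd⟩
  -- split each pair term into its small member i and its large member N / i
  have hstep2 : ∑ i ∈ N.divisors.filter (· ≤ Nat.sqrt N), (if i = N / i then i else i + N / i)
      = (∑ i ∈ N.divisors.filter (· ≤ Nat.sqrt N), i)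
        + ∑ i ∈ N.divisors.filter (· ≤ Nat.sqrt N), (if i = N / i then 0 else N / i) := by
    rw [← Finset.sum_add_distrib]
    apply Finset.sum_congr rfl
    intro i _
    split_ifs <;> omega
  have hstep3 : ∑ i ∈ N.divisors.filter (· ≤ Nat.sqrt N), (if i = N / i then 0 else N / i)
      = ∑ i ∈ (N.divisors.filter (· ≤ Nat.sqrt N)).filter (fun i => ¬ i = N / i), N / i := by
    rw [Finset.sum_filter (s := N.divisors.filter (· ≤ Nat.sqrt N))
      (p := fun i => ¬ i = N / i) (f := fun i => N / i)]
    apply Finset.sum_congr rfl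
    intro i _
    split_ifs <;> rfl
  -- i ↦ N / i is a bijection from the non-self-paired small divisors onto the large divisors
  have hbij : ∑ i ∈ (N.divisors.filter (· ≤ Nat.sqrt N)).filter (fun i => ¬ i = N / i), N / i
      = ∑ d ∈ N.divisors.filter (fun d => ¬ d ≤ Nat.sqrt N), d := by
    apply Finset.sum_nbij' (i := fun d => N / d) (j := fun e => N / e)
    · intro a ha
      simp only [Finset.mem_filter, Nat.mem_divisors] at ha ⊢
      obtain ⟨⟨⟨hd, hN0⟩, hle⟩, hne⟩ := ha
      have hq : a * (N / a) = N := Nat.mul_div_cancel' hd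
      have ha1 : 1 ≤ a := Nat.pos_of_dvd_of_pos hd (by omega)
      have hq1 : 1 ≤ N / a := Nat.div_pos (Nat.le_of_dvd (by omega) hd) (by omega)
      refine ⟨⟨Nat.div_dvd_of_dvd hd, hN0⟩, ?_⟩
      intro hc
      -- if N / a were also ≤ sqrt N, then N = sqrt N ^ 2 and a = N / a = sqrt N
      have hNr : N = Nat.sqrt N * Nat.sqrt N := by
        have := Nat.mul_le_mul hle hc
        omega
      have har : a = Nat.sqrt N := by
        by_contra hane
        have h5 : a * (N / a) ≤ a * Nat.sqrt N := Nat.mul_le_mul_left a hc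
        have h6 : a * Nat.sqrt N < Nat.sqrt N * Nat.sqrt N :=
          Nat.mul_lt_mul_of_lt_of_le (by omega) (le_refl _) hrpos
        omega
      have hqr : N / a = Nat.sqrt N := by
        apply Nat.eq_of_mul_eq_mul_left hrpos
        calc Nat.sqrt N * (N / a) = a * (N / a) := by rw [har]
          _ = N := hq
          _ = Nat.sqrt N * Nat.sqrt N := hNr
      omega
    · intro e he
      simp only [Finset.mem_filter, Nat.mem_divisors] at he ⊢
      obtain ⟨⟨hd, hN0⟩, hgt⟩ := he
      have hq : e * (N / e) = N := Nat.mul_div_cancel' hd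
      have he1 : 1 ≤ e := Nat.pos_of_dvd_of_pos hd (by omega)
      have hle : N / e ≤ Nat.sqrt N := by
        by_contra hc
        have h5 : (Nat.sqrt N + 1) * (Nat.sqrt N + 1) ≤ e * (N / e) :=
          Nat.mul_le_mul (by omega) (by omega)
        omega
      refine ⟨⟨⟨Nat.div_dvd_of_dvd hd, hN0⟩, hle⟩, ?_⟩
      rw [Nat.div_div_self hd (by omega)]
      omega
    · intro a ha
      simp only [Finset.mem_filter, Nat.mem_divisors] at ha
      exact Nat.div_div_self ha.1.1.1 (by omega)
    · intro e he
      simp only [Finset.mem_filter, Nat.mem_divisors] at he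
      exact Nat.div_div_self he.1.1 (by omega)
    · intro a _
      rfl
  rw [hstep1, hset, hstep2, hstep3, hbij, Finset.sum_filter_add_sum_filter_not]

theorem pv_sum_map_pyRange (f : Int → Int) (a : Int) (k : ℕ) :
    ((PySem.List.pyRange a (a + (k : Int)) 1).map f).sum = ∑ i ∈ Finset.range k, f (a + i) := by
  induction k with
  | zero =>
    rw [show a + ((0:ℕ):Int) = a by simp, PySem.List.pyRange_one_eq_nil (le_refl a)]
    simp
  | succ k ih =>
    have h1 : a + ((k + 1 : ℕ) : Int) = (a + k) + 1 := by push_cast; ring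
    rw [h1, PySem.List.pyRange_one_succ_right (by omega), List.map_append, List.sum_append,
      Finset.sum_range_succ, ih]
    simp

theorem pv_A_eq (n : Int) (hn : 1 ≤ n) :
    non_trival_divisiors n = ((∑ d ∈ n.toNat.divisors, d : ℕ) : Int) - 1 - n := by
  obtain ⟨N, hN⟩ : ∃ N : ℕ, n = (N : Int) := ⟨n.toNat, (Int.toNat_of_nonneg (by omega)).symm⟩
  subst hN
  have hN1 : 1 ≤ N := by exact_mod_cast hn
  unfold non_trival_divisiors
  have hfun : (fun (result i : Int) =>
      if PySem.Int.mod (N : Int) i = 0 then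
        if i = PySem.Int.floordiv (N : Int) i then result + i
        else result + (i + PySem.Int.floordiv (N : Int) i)
      else result)
      = fun result i => result +
          (if PySem.Int.mod (N : Int) i = 0 then
            (if i = PySem.Int.floordiv (N : Int) i then i
             else i + PySem.Int.floordiv (N : Int) i)
          else 0) := by
    funext result i
    split_ifs <;> ring
  rw [hfun, PySem.List.foldl_add]
  have hrange : ((Nat.sqrt (N : Int).toNat : Int) + 1) = 1 + (Nat.sqrt N : Int) := by
    simp [Int.toNat_natCast]
    ring
  rw [hrange, pv_sum_map_pyRange]
  have hterm : ∀ i ∈ Finset.range (Nat.sqrt N),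
      (if PySem.Int.mod (N : Int) (1 + (i : Int)) = 0 then
        (if (1 + (i : Int)) = PySem.Int.floordiv (N : Int) (1 + (i : Int)) then (1 + (i : Int))
         else (1 + (i : Int)) + PySem.Int.floordiv (N : Int) (1 + (i : Int)))
      else 0)
      = ((if N % (1 + i) = 0 then (if (1 + i) = N / (1 + i) then (1 + i) else (1 + i) + N / (1 + i)) else 0 : ℕ) : Int) := by
    intro i _
    have hc : ((1 + i : ℕ) : Int) = 1 + (i : Int) := by push_cast; ring
    rw [← hc, PySem.Int.mod_natCast, PySem.Int.floordiv_natCast]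
    norm_cast
  rw [Finset.sum_congr rfl hterm, ← Nat.cast_sum]
  have hre : ∑ i ∈ Finset.range (Nat.sqrt N),
      (if N % (1 + i) = 0 then (if (1 + i) = N / (1 + i) then (1 + i) else (1 + i) + N / (1 + i)) else 0)
      = ∑ j ∈ Finset.Ico 1 (Nat.sqrt N + 1),
      (if N % j = 0 then (if j = N / j then j else j + N / j) else 0) := by
    rw [Finset.sum_Ico_eq_sum_range]
    simp
  rw [hre, pv_core_sqrt_sum N hN1]
  simp [Int.toNat_natCast]

theorem pv_B_eq (n : Int) (hn : 1 ≤ n) :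
    pvBOuter 2 n 1 = ((∑ d ∈ n.toNat.divisors, d : ℕ) : Int) := by
  rw [pvBOuter_spec 2 n 1 (by omega) hn (fun q hq _ => by exact_mod_cast hq.two_le)]
  ring

-- ===== VERDICT (by name: the statement is the Claim_ definition above) =====
theorem non_trival_divisiors_spec : Claim_equal_non_trival_divisiors := by
  intro n _ hpre
  unfold Spec_non_trival_divisiors non_trival_divisiors_alt
  rw [pv_A_eq n hpre, pv_B_eq n hpre]
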